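-- pv_equiv track=rewrite | github.com/KoroLev2512/Compliance-audit | src/chain_algo/evolution.py | calculate_schedule
-- ===== SOURCE A (Python) =====
-- num_executors = 6  # Количество исполнителей
--
-- num_areas = 9      # Количество прикладных областей
--
-- tasks = [
--     [15, 15, 15, 15, 10, 10, 20, 15, 15, 15, 10, 15, 20, 10, 10, 15],  # Задачи в области 0
--     [60, 15, 15, 15, 15, 15, 15, 15, 120, 15, 15, 15, 10, 10, 10, 10, 10, 10, 15, 15, 15, 15, 15, 15, 15, 15, 15, 15, 15, 15, 15, 15, 15, 15, 15, 15, 10, 10, 10, 10, 10, 10, 10, 10, 10, 10, 10, 10, 10, 10, 10, 10, 10, 10, 10, 10, 10, 10, 10, 10, 10, 15, 15, 10, 10, 10, 10, 20, 5, 5, 5, 5, 5, 5, 15, 15, 15, 15, 15, 20, 15, 15, 15, 15, 15, 15, 15, 15, 15, 15],     # Задачи в области 1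
--     [10, 10, 10, 10, 10, 10],         # Задачи в области 2
--     [15, 1440, 15, 15, 30, 10, 10, 10, 10, 10, 10, 10, 10, 60, 60, 60, 30, 30, 30, 30, 30, 30, 10, 10, 10, 10, 10, 10, 10, 120, 180, 120, 10, 120, 120, 120, 40, 10, 60, 60, 60, 10],
--     [40, 45, 20, 35, 45, 35, 25, 35, 50, 45],
--     [20, 30, 20, 40, 25, 20, 50, 50, 45, 45, 45, 45, 30, 20, 45, 25, 40, 35, 20, 20, 20, 20, 20, 50, 40, 50, 45, 30, 45, 20],
--     [30, 25, 30, 40, 35, 25, 30, 20, 50, 30, 20, 40, 20, 35, 50, 50, 50, 30, 30, 50, 30, 45, 35, 25, 50, 40, 30, 50, 25, 25, 25, 30, 20, 45, 45, 35],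
--     [25, 25, 45, 20, 45, 20, 50, 20, 45, 30, 35, 25, 30, 35, 30],
--     [35, 25, 50, 40, 40, 25, 40, 40, 45, 50, 50, 35, 30, 50, 35]
--     # [150, 30, 30, 30, 30, 30] # 10
-- ]
--
-- def calculate_schedule(individual):
--     schedule = [[] for _ in range(num_executors)]
--     task_times = [0] * num_areas
--
--     for area, task_list in enumerate(tasks):
--         for task in task_list:
--             best_executor = None
--             best_time = float('inf')
--
--             for executor, assigned_area in enumerate(individual):
--                 if assigned_area == area:
--                     start_time = task_times[area]
--                     # end_time = start_time + task / efficiency[executor][area]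
--                     end_time = start_time + task
--
--
--                     if end_time < best_time:
--                         best_executor = executor
--                         best_time = end_time
--
--             if best_executor is not None:
--                 schedule[best_executor].append((area, task_times[area], best_time))
--                 task_times[area] = best_time
--
--     return schedule
-- ===== SOURCE B (Python) =====
-- num_executors = 6
-- num_areas = 9
--
-- tasks = [
--     [15, 15, 15, 15, 10, 10, 20, 15, 15, 15, 10, 15, 20, 10, 10, 15],
--     [60, 15, 15, 15, 15, 15, 15, 15, 120, 15, 15, 15, 10, 10, 10, 10, 10, 10, 15, 15, 15, 15, 15, 15, 15, 15, 15, 15, 15, 15, 15, 15, 15, 15, 15, 15, 10, 10, 10, 10, 10, 10, 10, 10, 10, 10, 10, 10, 10, 10, 10, 10, 10, 10, 10, 10, 10, 10, 10, 10, 10, 15, 15, 10, 10, 10, 10, 20, 5, 5, 5, 5, 5, 5, 15, 15, 15, 15, 15, 20, 15, 15, 15, 15, 15, 15, 15, 15, 15, 15],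
--     [10, 10, 10, 10, 10, 10],
--     [15, 1440, 15, 15, 30, 10, 10, 10, 10, 10, 10, 10, 10, 60, 60, 60, 30, 30, 30, 30, 30, 30, 10, 10, 10, 10, 10, 10, 10, 120, 180, 120, 10, 120, 120, 120, 40, 10, 60, 60, 60, 10],
--     [40, 45, 20, 35, 45, 35, 25, 35, 50, 45],
--     [20, 30, 20, 40, 25, 20, 50, 50, 45, 45, 45, 45, 30, 20, 45, 25, 40, 35, 20, 20, 20, 20, 20, 50, 40, 50, 45, 30, 45, 20],
--     [30, 25, 30, 40, 35, 25, 30, 20, 50, 30, 20, 40, 20, 35, 50, 50, 50, 30, 30, 50, 30, 45, 35, 25, 50, 40, 30, 50, 25, 25, 25, 30, 20, 45, 45, 35],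
--     [25, 25, 45, 20, 45, 20, 50, 20, 45, 30, 35, 25, 30, 35, 30],
--     [35, 25, 50, 40, 40, 25, 40, 40, 45, 50, 50, 35, 30, 50, 35]
-- ]
--
-- def calculate_schedule(individual):
--     # Index the first executor of each assigned area once, then emit each
--     # area's rows in a single pass with a running clock (no per-task rescans).
--     schedule = [[] for _ in range(num_executors)]
--     first_exec = {}
--     for i, a in enumerate(individual):
--         if a not in first_exec:
--             first_exec[a] = i
--     for area, task_list in enumerate(tasks):
--         e = first_exec.get(area)
--         if e is not None:
--             row = schedule[e]
--             t = 0
--             for task in task_list: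
--                 row.append((area, t, t + task))
--                 t += task
--     return schedule
-- ===== Notes on version B (the rewrite author's own statement) =====
-- stated objective: faster
-- what changed: Instead of rescanning the whole individual for every single task, B builds a first-occurrence index of individual once and then emits each area's rows in one pass with a running clock.
import Mathlib
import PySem

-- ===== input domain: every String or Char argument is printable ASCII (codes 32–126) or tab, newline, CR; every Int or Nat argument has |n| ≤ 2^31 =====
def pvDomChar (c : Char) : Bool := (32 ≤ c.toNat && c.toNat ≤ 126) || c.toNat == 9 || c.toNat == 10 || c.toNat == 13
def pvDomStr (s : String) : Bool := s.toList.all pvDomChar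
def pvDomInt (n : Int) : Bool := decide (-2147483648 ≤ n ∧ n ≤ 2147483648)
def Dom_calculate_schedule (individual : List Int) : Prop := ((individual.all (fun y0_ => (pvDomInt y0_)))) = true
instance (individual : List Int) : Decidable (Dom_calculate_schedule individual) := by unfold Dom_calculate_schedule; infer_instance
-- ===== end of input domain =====

-- B replaces A's per-task rescan of `individual` with a first-occurrence index built once
-- plus one running-clock pass per area (objective: faster).
-- Pre_ excludes exactly the inputs where Python A raises IndexError
-- (an area whose first assigned executor has index >= 6).


-- shared data: the module-level `tasks` constant
def tasksConst : List (List Int) := [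
  [15, 15, 15, 15, 10, 10, 20, 15, 15, 15, 10, 15, 20, 10, 10, 15],
  [60, 15, 15, 15, 15, 15, 15, 15, 120, 15, 15, 15, 10, 10, 10, 10, 10, 10, 15, 15, 15, 15, 15, 15, 15, 15, 15, 15, 15, 15, 15, 15, 15, 15, 15, 15, 10, 10, 10, 10, 10, 10, 10, 10, 10, 10, 10, 10, 10, 10, 10, 10, 10, 10, 10, 10, 10, 10, 10, 10, 10, 15, 15, 10, 10, 10, 10, 20, 5, 5, 5, 5, 5, 5, 15, 15, 15, 15, 15, 20, 15, 15, 15, 15, 15, 15, 15, 15, 15, 15],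
  [10, 10, 10, 10, 10, 10],
  [15, 1440, 15, 15, 30, 10, 10, 10, 10, 10, 10, 10, 10, 60, 60, 60, 30, 30, 30, 30, 30, 30, 10, 10, 10, 10, 10, 10, 10, 120, 180, 120, 10, 120, 120, 120, 40, 10, 60, 60, 60, 10],
  [40, 45, 20, 35, 45, 35, 25, 35, 50, 45],
  [20, 30, 20, 40, 25, 20, 50, 50, 45, 45, 45, 45, 30, 20, 45, 25, 40, 35, 20, 20, 20, 20, 20, 50, 40, 50, 45, 30, 45, 20],
  [30, 25, 30, 40, 35, 25, 30, 20, 50, 30, 20, 40, 20, 35, 50, 50, 50, 30, 30, 50, 30, 45, 35, 25, 50, 40, 30, 50, 25, 25, 25, 30, 20, 45, 45, 35],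
  [25, 25, 45, 20, 45, 20, 50, 20, 45, 30, 35, 25, 30, 35, 30],
  [35, 25, 50, 40, 40, 25, 40, 40, 45, 50, 50, 35, 30, 50, 35]]

-- ===== PORT A =====
-- transliteration of A: per task, scan all executors for the best (first) match;
-- best_time = float('inf') is modelled as `none` (none = +inf in the comparison).
def innerLoopA (individual : List Int) (area : Int) (task_times : List Int) (task : Int) :
    Option Int × Option Int :=
  (PySem.List.enumerate individual 0).foldl
    (fun best q =>
      if q.2 = area then
        let start_time := task_times.getD area.toNat 0
        let end_time := start_time + task
        if (match best.2 with | none => true | some v => end_time < v) then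
          (some q.1, some end_time)
        else best
      else best) (none, none)

def taskStepA (individual : List Int) (area : Int)
    (st : List (List (Int × Int × Int)) × List Int) (task : Int) :
    List (List (Int × Int × Int)) × List Int :=
  match innerLoopA individual area st.2 task with
  | (some be, some bt) =>
      (st.1.modify be.toNat (fun l => l ++ [(area, st.2.getD area.toNat 0, bt)]),
       st.2.set area.toNat bt)
  | _ => st

def calculate_schedule (individual : List Int) : List (List (Int × Int × Int)) :=
  ((PySem.List.enumerate tasksConst 0).foldl
      (fun st p => p.2.foldl (taskStepA individual p.1) st)
      ((List.replicate 6 ([] : List (Int × Int × Int)), List.replicate 9 (0 : Int)))).1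

-- ===== PORT B =====
-- transliteration of B (Source B): first-occurrence dict, then one running-clock pass per area.
def buildFirstExec (individual : List Int) : PySem.Dict Int Int :=
  (PySem.List.enumerate individual 0).foldl
    (fun d q => if (d.get? q.2).isSome then d else d.insert q.2 q.1) PySem.Dict.empty

def buildRowB (area : Int) (task_list : List Int) : Int × List (Int × Int × Int) :=
  task_list.foldl
    (fun (r : Int × List (Int × Int × Int)) task =>
      (r.1 + task, r.2 ++ [(area, r.1, r.1 + task)])) ((0 : Int), [])

def areaStepB (first_exec : PySem.Dict Int Int)
    (schedule : List (List (Int × Int × Int))) (p : Int × List Int) :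
    List (List (Int × Int × Int)) :=
  match first_exec.get? p.1 with
  | none => schedule
  | some e => schedule.modify e.toNat (fun l => l ++ (buildRowB p.1 p.2).2)

def calculate_schedule_alt (individual : List Int) : List (List (Int × Int × Int)) :=
  (PySem.List.enumerate tasksConst 0).foldl (areaStepB (buildFirstExec individual))
    (List.replicate 6 [])

-- ===== PRECONDITION & SPEC =====
-- Pre_ holds exactly when Python A returns normally: every executor index ≥ 6 whose
-- assigned area is one of the 9 real areas is preceded by an executor with index < 6
-- and the same area (so the first executor of each assigned area has index < 6 and
-- schedule[best_executor] never raises IndexError).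
def Pre_calculate_schedule (individual : List Int) : Prop :=
  ∀ i ∈ List.range individual.length, 6 ≤ i →
    0 ≤ individual.getD i 0 → individual.getD i 0 < 9 →
    ∃ j ∈ List.range 6, j < individual.length ∧ individual.getD j 0 = individual.getD i 0
instance (individual : List Int) : Decidable (Pre_calculate_schedule individual) := by
  unfold Pre_calculate_schedule; infer_instance
def pvWitness_calculate_schedule : List Int := [0, 1, 2, 3, 4, 5]
def Spec_calculate_schedule (individual : List Int) (out : List (List (Int × Int × Int))) : Prop := out = calculate_schedule_alt individual
instance (individual : List Int) (out : List (List (Int × Int × Int))) : Decidable (Spec_calculate_schedule individual out) := by unfold Spec_calculate_schedule; infer_instance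

-- ===== CLAIM (what is proved, stated in full; the proofs are below) =====
def Claim_equal_calculate_schedule : Prop := ∀ (individual : List Int), Dom_calculate_schedule individual → Pre_calculate_schedule individual → Spec_calculate_schedule individual (calculate_schedule individual)

-- ===== LEMMAS AND PROOFS =====

-- index of the first occurrence of v in l, counting from s (reference function of the proofs)
def firstFrom : List Int → Int → Int → Option Int
  | [], _, _ => none
  | a :: t, s, v => if a = v then some s else firstFrom t (s + 1) v

-- the rows one area contributes, with a running clock starting at t
def mkRow (area : Int) : Int → List Int → List (Int × Int × Int)
  | _, [] => []
  | t, task :: r => (area, t, t + task) :: mkRow area (t + task) r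

-- A's inner-scan body, with the (constant) end time T abstracted out
def innerF (area T : Int) (best : Option Int × Option Int) (q : Int × Int) :
    Option Int × Option Int :=
  if q.2 = area then
    (if (match best.2 with | none => true | some v => T < v) then (some q.1, some T) else best)
  else best

theorem innerF_keep (l : List Int) (s area T e : Int) :
    (PySem.List.enumerate l s).foldl (innerF area T) (some e, some T) = (some e, some T) := by
  induction l generalizing s with
  | nil => rfl
  | cons a t ih =>
      simp only [PySem.List.enumerate_cons, List.foldl_cons, innerF]
      split
      · simp only [lt_irrefl]
        simpa using ih (s + 1)
      · exact ih (s + 1)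

theorem innerF_start (l : List Int) (s area T : Int) :
    (PySem.List.enumerate l s).foldl (innerF area T) (none, none)
      = match firstFrom l s area with
        | none => (none, none)
        | some i => (some i, some T) := by
  induction l generalizing s with
  | nil => rfl
  | cons a t ih =>
      simp only [PySem.List.enumerate_cons, List.foldl_cons, innerF, firstFrom]
      by_cases h : a = area
      · simp only [h]
        simpa using innerF_keep t (s + 1) area T s
      · simp only [if_neg h]
        exact ih (s + 1)

theorem innerLoopA_eq (individual : List Int) (area : Int) (tt : List Int) (task : Int) :
    innerLoopA individual area tt task
      = match firstFrom individual 0 area with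
        | none => (none, none)
        | some i => (some i, some (tt.getD area.toNat 0 + task)) := by
  have : innerLoopA individual area tt task
      = (PySem.List.enumerate individual 0).foldl
          (innerF area (tt.getD area.toNat 0 + task)) (none, none) := rfl
  rw [this, innerF_start]

theorem taskFoldA_none (individual : List Int) (area : Int)
    (h : firstFrom individual 0 area = none) (tl : List Int)
    (st : List (List (Int × Int × Int)) × List Int) :
    tl.foldl (taskStepA individual area) st = st := by
  induction tl generalizing st with
  | nil => rfl
  | cons task r ih =>
      have hstep : taskStepA individual area st task = st := by
        simp [taskStepA, innerLoopA_eq, h]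
      rw [List.foldl_cons, hstep, ih]

theorem taskFoldA_some (individual : List Int) (area : Int) (e : Int)
    (h : firstFrom individual 0 area = some e) (tl : List Int)
    (sched : List (List (Int × Int × Int))) (tt : List Int)
    (hlen : area.toNat < tt.length) :
    tl.foldl (taskStepA individual area) (sched, tt)
      = (sched.modify e.toNat (fun l => l ++ mkRow area (tt.getD area.toNat 0) tl),
         tt.set area.toNat (tt.getD area.toNat 0 + tl.sum)) := by
  induction tl generalizing sched tt with
  | nil =>
      simp only [List.foldl_nil, mkRow, List.sum_nil, List.append_nil, Int.add_zero, Prod.mk.injEq]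
      refine ⟨(List.modify_id e.toNat sched).symm, ?_⟩
      rw [List.getD, List.getElem?_eq_getElem hlen]
      simp [List.set_getElem_self]
  | cons task r ih =>
      have hstep : taskStepA individual area (sched, tt) task
          = (sched.modify e.toNat
               (fun l => l ++ [(area, tt.getD area.toNat 0, tt.getD area.toNat 0 + task)]),
             tt.set area.toNat (tt.getD area.toNat 0 + task)) := by
        simp [taskStepA, innerLoopA_eq, h]
      rw [List.foldl_cons, hstep,
        ih _ _ (by simpa using hlen)]
      have hset : (tt.set area.toNat (tt.getD area.toNat 0 + task)).getD area.toNat 0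
          = tt.getD area.toNat 0 + task := by
        simp [List.getD, hlen]
      rw [hset, List.modify_modify_eq, List.set_set]
      simp only [Prod.mk.injEq]
      refine ⟨?_, ?_⟩
      · congr 1
        funext l
        simp [mkRow, Function.comp]
      · congr 1
        simp only [List.sum_cons]
        ring

theorem dictAux (l : List Int) (s : Int) (d : PySem.Dict Int Int) (v : Int) :
    ((PySem.List.enumerate l s).foldl
        (fun d q => if (d.get? q.2).isSome then d else d.insert q.2 q.1) d).get? v
      = (d.get? v).or (firstFrom l s v) := by
  induction l generalizing s d with
  | nil => cases h : d.get? v <;> simp [firstFrom, h]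
  | cons a t ih =>
      simp only [PySem.List.enumerate_cons, List.foldl_cons, firstFrom]
      by_cases hav : a = v
      · subst hav
        cases h : d.get? a with
        | some x => simp [h, ih, Option.or]
        | none =>
            simp only [Option.isSome_none, Bool.false_eq_true, if_false, ih,
              PySem.Dict.get?_insert_self]
            simp [Option.or]
      · have hget : ∀ d' : PySem.Dict Int Int,
            ((if (d.get? a).isSome then d else d.insert a s) : PySem.Dict Int Int).get? v
              = d.get? v := by
          intro _
          split
          · rfl
          · exact PySem.Dict.get?_insert_of_ne d s (fun h => hav h.symm)
        rw [ih]
        rw [hget d]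
        simp [if_neg hav]

theorem buildFirstExec_get (individual : List Int) (v : Int) :
    (buildFirstExec individual).get? v = firstFrom individual 0 v := by
  unfold buildFirstExec
  rw [dictAux]
  simp [Option.or]

theorem buildRowB_snd (area : Int) (tl : List Int) (t : Int)
    (r : List (Int × Int × Int)) :
    (tl.foldl (fun (r : Int × List (Int × Int × Int)) task =>
        (r.1 + task, r.2 ++ [(area, r.1, r.1 + task)])) (t, r)).2
      = r ++ mkRow area t tl := by
  induction tl generalizing t r with
  | nil => simp [mkRow]
  | cons task rest ih =>
      rw [List.foldl_cons, ih]
      simp [mkRow]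

theorem mainFold (individual : List Int) (tls : List (List Int)) (s : Nat)
    (sched : List (List (Int × Int × Int))) (tt : List Int)
    (hlen : s + tls.length ≤ tt.length)
    (hzero : ∀ j, s ≤ j → tt.getD j 0 = 0) :
    ((PySem.List.enumerate tls (s : Int)).foldl
        (fun st p => p.2.foldl (taskStepA individual p.1) st) (sched, tt)).1
      = (PySem.List.enumerate tls (s : Int)).foldl
          (areaStepB (buildFirstExec individual)) sched := by
  induction tls generalizing s sched tt with
  | nil => rfl
  | cons tl rest ih =>
      have hcast : (s : Int) + 1 = ((s + 1 : Nat) : Int) := by push_cast; ring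
      simp only [PySem.List.enumerate_cons, List.foldl_cons, hcast]
      have htoNat : ((s : Int)).toNat = s := Int.toNat_natCast s
      cases h : firstFrom individual 0 (s : Int) with
      | none =>
          rw [taskFoldA_none individual _ h]
          have hB : areaStepB (buildFirstExec individual) sched ((s : Int), tl) = sched := by
            simp [areaStepB, buildFirstExec_get, h]
          rw [hB]
          exact ih (s + 1) sched tt (by simp at hlen ⊢; omega)
            (fun j hj => hzero j (by omega))
      | some e =>
          have hslen : s < tt.length := by simp at hlen; omega
          rw [taskFoldA_some individual _ e h tl sched tt (by rwa [htoNat])]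
          have ht0 : tt.getD ((s : Int)).toNat 0 = 0 := by rw [htoNat]; exact hzero s le_rfl
          have hB : areaStepB (buildFirstExec individual) sched ((s : Int), tl)
              = sched.modify e.toNat (fun l => l ++ mkRow (s : Int) 0 tl) := by
            simp only [areaStepB, buildFirstExec_get, h]
            have : (buildRowB (s : Int) tl).2 = mkRow (s : Int) 0 tl := by
              unfold buildRowB
              simpa using buildRowB_snd (s : Int) tl 0 []
            rw [this]
          rw [ht0, hB]
          refine ih (s + 1) _ _ (by simp at hlen ⊢; omega) ?_
          intro j hj
          rw [htoNat]
          have hjs : s ≠ j := by omega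
          rw [List.getD, List.getElem?_set_ne hjs, ← List.getD]
          exact hzero j (by omega)

theorem replicate_getD (j : Nat) : (List.replicate 9 (0 : Int)).getD j 0 = 0 := by
  simp only [List.getD, List.getElem?_replicate]; split <;> simp

theorem calculate_schedule_spec : Claim_equal_calculate_schedule := by
  intro individual _ _
  unfold Spec_calculate_schedule calculate_schedule calculate_schedule_alt
  have := mainFold individual tasksConst 0 (List.replicate 6 [])
      (List.replicate 9 (0 : Int)) (by simp [tasksConst]) (fun j _ => replicate_getD j)
  simpa using this
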